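-- pv_equiv track=rewrite | github.com/wliwh/works | 文档校正程序/foot/footnote_corr.py | process_page_footnotes
-- ===== SOURCE A (Python) =====
-- from typing import List, Tuple, Dict
--
-- def process_page_footnotes(footnotes: List[Tuple[int, str]]) -> Tuple[List[str], bool]:
--     """
--     处理一页的脚注：排序并检查序号连续性
--
--     Args:
--         footnotes: 脚注列表
--
--     Returns:
--         排序后的脚注行列表和是否有序号问题的标志
--     """
--     if not footnotes:
--         return [], False
--
--     # 按脚注编号排序
--     footnotes.sort(key=lambda x: x[0])
--
--     # 检查序号连续性
--     has_problem = False
--     expected_num = 1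
--     footnote_nums = [fn[0] for fn in footnotes]
--
--     # 检查是否从1开始且连续
--     for num in footnote_nums:
--         if num != expected_num:
--             has_problem = True
--             break
--         expected_num += 1
--
--     # 检查是否有重复
--     if len(footnote_nums) != len(set(footnote_nums)):
--         has_problem = True
--
--     # 生成输出行
--     output_lines = []
--     for num, content in footnotes:
--         output_lines.append(content)
--
--     return output_lines, has_problem
-- ===== SOURCE B (Python) =====
-- from typing import List, Tuple
--
-- def process_page_footnotes(footnotes: List[Tuple[int, str]]) -> Tuple[List[str], bool]:
--     # Group contents by footnote number (hash map), keeping per-number arrival order.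
--     groups = {}
--     for num, content in footnotes:
--         groups.setdefault(num, []).append(content)
--     order = sorted(groups)
--     # Same observable in-place reordering as the original's stable sort.
--     footnotes[:] = [(num, c) for num in order for c in groups[num]]
--     lines = [c for num in order for c in groups[num]]
--     has_problem = len(groups) != len(footnotes) or order != list(range(1, len(footnotes) + 1))
--     return lines, has_problem
-- ===== Notes on version B (the rewrite author's own statement) =====
-- stated objective: alternative
-- what changed: Instead of sorting the pairs and running a counter-based continuity scan plus a set-based duplicate check, B groups contents by footnote number in a dict, sorts only the distinct numbers, concatenates the groups in key order, and flags a problem via the dict size (duplicates) and a comparison of the distinct sorted keys with range(1, n+1) (continuity).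
import Mathlib
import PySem

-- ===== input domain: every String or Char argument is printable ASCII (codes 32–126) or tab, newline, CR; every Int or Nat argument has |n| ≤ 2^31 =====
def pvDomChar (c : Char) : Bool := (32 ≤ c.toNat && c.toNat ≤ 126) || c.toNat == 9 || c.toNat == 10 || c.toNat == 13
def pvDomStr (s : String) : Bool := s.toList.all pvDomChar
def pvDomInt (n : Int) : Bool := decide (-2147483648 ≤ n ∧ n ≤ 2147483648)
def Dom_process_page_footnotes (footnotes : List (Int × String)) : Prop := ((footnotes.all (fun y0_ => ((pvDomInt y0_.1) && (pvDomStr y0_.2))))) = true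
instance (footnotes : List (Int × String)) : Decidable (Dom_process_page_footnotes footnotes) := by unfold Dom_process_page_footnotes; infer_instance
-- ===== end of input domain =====

-- B groups contents by footnote number in a dict, sorts the distinct numbers, concatenates the
-- groups, and flags problems via the dict size and a comparison of the keys with range(1, n+1)
-- (alternative decomposition, same cost). Both Pythons reorder the argument list in place the same
-- way; the equivalence proved here is about the RETURN value.

-- ===== PORT A =====
-- the 'for num in footnote_nums' loop with its break, returning has_problem
def ppfLoopA : List Int → Int → Bool
  | [], _ => false
  | n :: t, e => if n ≠ e then true else ppfLoopA t (e + 1)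

def process_page_footnotes (footnotes : List (Int × String)) : List String × Bool :=
  if footnotes = [] then ([], false)
  else
    let fs := PySem.List.sorted footnotes (fun x => x.1) false
    let footnote_nums := fs.map (fun fn => fn.1)
    let has_problem := ppfLoopA footnote_nums 1
    let has_problem :=
      if footnote_nums.length ≠ (PySem.Set.ofList footnote_nums).length then true else has_problem
    let output_lines := fs.foldl (fun acc p => acc ++ [p.2]) []
    (output_lines, has_problem)

-- ===== PORT B =====
def process_page_footnotes_alt (footnotes : List (Int × String)) : List String × Bool :=
  -- groups.setdefault(num, []).append(content)  ≡  groups[num] = groups.get(num, []) + [content]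
  let groups : PySem.Dict Int (List String) :=
    footnotes.foldl (fun d p => d.modify p.1 [] (fun l => l ++ [p.2])) PySem.Dict.empty
  let order := PySem.List.sorted groups.keys (fun k => k) false
  let lines := order.flatMap (fun k => groups.getD k [])
  let has_problem :=
    decide (groups.size ≠ footnotes.length) ||
      decide (order ≠ PySem.List.pyRange 1 ((footnotes.length : Int) + 1) 1)
  (lines, has_problem)

-- ===== PRECONDITION & SPEC =====
def Spec_process_page_footnotes (footnotes : List (Int × String)) (out : List String × Bool) : Prop := out = process_page_footnotes_alt footnotes
instance (footnotes : List (Int × String)) (out : List String × Bool) : Decidable (Spec_process_page_footnotes footnotes out) := by unfold Spec_process_page_footnotes; infer_instance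

-- ===== CLAIM (what is proved, stated in full; the proofs are below) =====
def Claim_equal_process_page_footnotes : Prop := ∀ (footnotes : List (Int × String)), Dom_process_page_footnotes footnotes → Spec_process_page_footnotes footnotes (process_page_footnotes footnotes)

-- ===== LEMMAS AND PROOFS =====

-- the distinct footnote numbers in sorted order, and the stable sort rebuilt group by group
def ppfOrd (l : List (Int × String)) : List Int :=
  PySem.List.sorted (PySem.Set.ofList (l.map Prod.fst)) (fun k => k) false

def ppfGrp (l : List (Int × String)) : List (Int × String) :=
  (ppfOrd l).flatMap (fun k => l.filter (fun p => p.1 == k))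

-- A's loop returns false exactly when the numbers are e, e+1, …
theorem ppfLoopA_false_iff (l : List Int) (e : Int) :
    ppfLoopA l e = false ↔ l = PySem.List.pyRange e (e + l.length) 1 := by
  induction l generalizing e with
  | nil => simp [ppfLoopA, PySem.List.pyRange_one_eq_nil (le_refl e)]
  | cons n t ih =>
    have hlt : e < e + ((n :: t).length : Int) := by
      rw [List.length_cons]; push_cast; omega
    have harith : e + ((n :: t).length : Int) = (e + 1) + (t.length : Int) := by
      rw [List.length_cons]; push_cast; ring
    rw [PySem.List.pyRange_one_cons hlt, harith]
    simp only [ppfLoopA, List.cons.injEq]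
    by_cases hc : n = e
    · subst hc
      rw [if_neg (by simp)]
      simp only [true_and]
      exact ih (n + 1)
    · rw [if_pos hc]
      simp [hc]

-- the has_problem computation of A equals one comparison with range(1, len+1)
theorem hp_eq (nums : List Int) :
    (if nums.length ≠ (PySem.Set.ofList nums).length then true else ppfLoopA nums 1)
      = decide (nums ≠ PySem.List.pyRange 1 (1 + (nums.length : Int)) 1) := by
  by_cases hr : nums = PySem.List.pyRange 1 (1 + (nums.length : Int)) 1
  · have hloop : ppfLoopA nums 1 = false := (ppfLoopA_false_iff nums 1).2 hr
    have hnd : nums.Nodup := by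
      rw [hr]; exact PySem.List.nodup_pyRange_one _ _
    have hset : PySem.Set.ofList nums = nums := PySem.Set.ofList_eq_self_of_nodup nums hnd
    rw [hset, if_neg (by simp), hloop]
    exact (decide_eq_false (not_not_intro hr)).symm
  · by_cases hd : nums.length = (PySem.Set.ofList nums).length
    · rw [if_neg (not_not_intro hd)]
      have hl : ppfLoopA nums 1 = true := by
        cases h : ppfLoopA nums 1
        · exact absurd ((ppfLoopA_false_iff nums 1).1 h) hr
        · rfl
      rw [hl]
      exact (decide_eq_true hr).symm
    · rw [if_pos hd]
      exact (decide_eq_true hr).symm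

theorem flatMap_congr_mem {α β : Type} (l : List α) (f g : α → List β)
    (h : ∀ x ∈ l, f x = g x) : l.flatMap f = l.flatMap g := by
  induction l with
  | nil => rfl
  | cons a t ih =>
    simp only [List.flatMap_cons, h a (by simp)]
    rw [ih (fun x hx => h x (by simp [hx]))]

theorem insertBy_append_skip {α : Type} (before : α → α → Bool) (x : α) (l1 l2 : List α)
    (h : ∀ y ∈ l1, before x y = false) :
    PySem.List.insertBy before x (l1 ++ l2) = l1 ++ PySem.List.insertBy before x l2 := by
  induction l1 with
  | nil => rfl
  | cons a t ih =>
    simp only [List.cons_append, PySem.List.insertBy, h a (by simp)]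
    simp only [Bool.false_eq_true, if_false, List.cons.injEq, true_and]
    exact ih (fun y hy => h y (by simp [hy]))

theorem insertBy_front {α : Type} (before : α → α → Bool) (x : α) (l : List α)
    (h : ∀ y ∈ l, before x y = true) :
    PySem.List.insertBy before x l = x :: l := by
  cases l with
  | nil => rfl
  | cons a t => simp [PySem.List.insertBy, h a (by simp)]

-- inserting p whose number already occurs appends it at the end of its group
theorem insertBy_flatMap_mem (ord : List Int) (g : Int → List (Int × String)) (p : Int × String)
    (hord : ord.Pairwise (· < ·)) (hg : ∀ k ∈ ord, ∀ x ∈ g k, x.1 = k) (hp : p.1 ∈ ord) :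
    PySem.List.insertBy (fun a b => decide (a.1 < b.1)) p (ord.flatMap g)
      = ord.flatMap (fun k => g k ++ if p.1 == k then [p] else []) := by
  induction ord with
  | nil => cases hp
  | cons k rest ih =>
    have hkrest : ∀ k' ∈ rest, k < k' := by
      intro k' hk'; exact (List.pairwise_cons.1 hord).1 k' hk'
    simp only [List.flatMap_cons]
    by_cases hk : p.1 = k
    · have hskip : ∀ y ∈ g k, (decide (p.1 < y.1)) = false := by
        intro y hy
        rw [hg k (by simp) y hy, hk]
        simp
      rw [insertBy_append_skip _ _ _ _ hskip]
      have hfront : ∀ y ∈ rest.flatMap g, (decide (p.1 < y.1)) = true := by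
        intro y hy
        rcases List.mem_flatMap.1 hy with ⟨k', hk', hy'⟩
        rw [hg k' (by simp [hk']) y hy', hk]
        simpa using hkrest k' hk'
      rw [insertBy_front _ _ _ hfront]
      have hnr : ∀ k' ∈ rest, (p.1 == k') = false := by
        intro k' hk'
        have := hkrest k' hk'
        simp only [beq_eq_false_iff_ne, ne_eq]
        omega
      rw [flatMap_congr_mem rest (fun k' => g k' ++ if p.1 == k' then [p] else []) g
            (fun k' hk' => by simp [hnr k' hk'])]
      subst hk
      simp
    · have hprest : p.1 ∈ rest := by
        rcases List.mem_cons.1 hp with h | h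
        · exact absurd h hk
        · exact h
      have hgt : k < p.1 := hkrest _ hprest
      have hskip : ∀ y ∈ g k, (decide (p.1 < y.1)) = false := by
        intro y hy
        rw [hg k (by simp) y hy]
        simp; omega
      rw [insertBy_append_skip _ _ _ _ hskip,
          ih (List.pairwise_cons.1 hord).2 (fun k' hk' x hx => hg k' (by simp [hk']) x hx) hprest]
      have : (p.1 == k) = false := by simp [hk]
      simp [this]

-- inserting p with a fresh number creates a new singleton group at its sorted position
theorem insertBy_flatMap_new (ord : List Int) (g : Int → List (Int × String)) (p : Int × String)
    (hord : ord.Pairwise (· < ·)) (hg : ∀ k ∈ ord, ∀ x ∈ g k, x.1 = k) (hp : p.1 ∉ ord) :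
    PySem.List.insertBy (fun a b => decide (a.1 < b.1)) p (ord.flatMap g)
      = (PySem.List.insertBy (fun a b => decide (a < b)) p.1 ord).flatMap
          (fun k => if p.1 == k then [p] else g k) := by
  induction ord with
  | nil => simp [PySem.List.insertBy]
  | cons k rest ih =>
    have hkrest : ∀ k' ∈ rest, k < k' := by
      intro k' hk'; exact (List.pairwise_cons.1 hord).1 k' hk'
    have hk : p.1 ≠ k := fun h => hp (by simp [h])
    have hnr : ∀ k' ∈ k :: rest, (p.1 == k') = false := by
      intro k' hk'
      have : p.1 ≠ k' := fun h => hp (h ▸ hk')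
      simp [this]
    by_cases hlt : p.1 < k
    · have hfront : ∀ y ∈ (k :: rest).flatMap g, (decide (p.1 < y.1)) = true := by
        intro y hy
        rcases List.mem_flatMap.1 hy with ⟨k', hk', hy'⟩
        rw [hg k' hk' y hy']
        rcases List.mem_cons.1 hk' with h | h
        · simpa [h] using hlt
        · have := hkrest k' h; simp; omega
      rw [insertBy_front _ _ _ hfront]
      have hins : PySem.List.insertBy (fun a b => decide (a < b)) p.1 (k :: rest)
          = p.1 :: k :: rest := by
        simp [PySem.List.insertBy, hlt]
      rw [hins]
      simp only [List.flatMap_cons, beq_self_eq_true, if_pos]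
      rw [flatMap_congr_mem rest (fun k' => if p.1 == k' then [p] else g k') g
            (fun k' hk' => by simp [hnr k' (by simp [hk'])])]
      simp [hnr k (by simp)]
    · simp only [List.flatMap_cons]
      have hskip : ∀ y ∈ g k, (decide (p.1 < y.1)) = false := by
        intro y hy
        rw [hg k (by simp) y hy]
        simpa using hlt
      have hprest : p.1 ∉ rest := fun h => hp (by simp [h])
      rw [insertBy_append_skip _ _ _ _ hskip,
          ih (List.pairwise_cons.1 hord).2 (fun k' hk' x hx => hg k' (by simp [hk']) x hx) hprest]
      have hins : PySem.List.insertBy (fun a b => decide (a < b)) p.1 (k :: rest)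
          = k :: PySem.List.insertBy (fun a b => decide (a < b)) p.1 rest := by
        simp [PySem.List.insertBy, hlt]
      rw [hins, List.flatMap_cons]
      have hbk : (p.1 == k) = false := by simp [hk]
      rw [hbk]
      simp

theorem ofList_append_singleton {α : Type} [BEq α] (xs : List α) (x : α) :
    PySem.Set.ofList (xs ++ [x]) = PySem.Set.add (PySem.Set.ofList xs) x := by
  rw [PySem.Set.ofList_eq_foldl, PySem.Set.ofList_eq_foldl, List.foldl_append]
  rfl

-- the key-grouping hypothesis for the filter groups
theorem ppf_hg (l : List (Int × String)) :
    ∀ k ∈ ppfOrd l, ∀ x ∈ l.filter (fun p => p.1 == k), x.1 = k := by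
  intro k _ x hx
  have := (List.mem_filter.1 hx).2
  simpa using this

-- STABLE SORT = GROUPED: sorting the pairs by number equals concatenating the per-number
-- groups (in arrival order) along the sorted distinct numbers
theorem sorted_fst_eq_grp (l : List (Int × String)) :
    PySem.List.sorted l (fun p => p.1) false = ppfGrp l := by
  induction l using List.reverseRecOn with
  | nil => rfl
  | append_singleton fs p ih =>
    have hstep : PySem.List.sorted (fs ++ [p]) (fun x => x.1) false
        = PySem.List.insertBy (fun a b => decide (a.1 < b.1)) p
            (PySem.List.sorted fs (fun x => x.1) false) := by
      rw [PySem.List.sorted_eq_foldl_insertBy, PySem.List.sorted_eq_foldl_insertBy,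
          List.foldl_append]
      rfl
    have hmapfst : (fs ++ [p]).map Prod.fst = fs.map Prod.fst ++ [p.1] := by simp
    have hord : List.Pairwise (· < ·) (ppfOrd fs) :=
      PySem.List.sorted_ofList_pairwise_lt (fs.map Prod.fst)
    have hg := ppf_hg fs
    by_cases hmem : p.1 ∈ fs.map Prod.fst
    · have hcont : (PySem.Set.ofList (fs.map Prod.fst)).contains p.1 = true := by
        have : p.1 ∈ PySem.Set.ofList (fs.map Prod.fst) :=
          (PySem.Set.mem_ofList _ _).2 hmem
        simpa using this
      have hset : PySem.Set.ofList ((fs ++ [p]).map Prod.fst)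
          = PySem.Set.ofList (fs.map Prod.fst) := by
        rw [hmapfst, ofList_append_singleton, PySem.Set.add, if_pos hcont]
      have hordeq : ppfOrd (fs ++ [p]) = ppfOrd fs := by
        unfold ppfOrd; rw [hset]
      have hpin : p.1 ∈ ppfOrd fs := by
        unfold ppfOrd
        rw [PySem.List.mem_sorted]
        exact (PySem.Set.mem_ofList _ _).2 hmem
      rw [hstep, ih]
      unfold ppfGrp
      rw [hordeq]
      rw [insertBy_flatMap_mem _ _ _ hord hg hpin]
      refine flatMap_congr_mem _ _ _ (fun k _ => ?_)
      rw [List.filter_append]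
      by_cases hk : p.1 = k
      · simp [List.filter, hk]
      · have hb : (p.1 == k) = false := by simp [hk]
        simp [List.filter, hb]
    · have hcont : (PySem.Set.ofList (fs.map Prod.fst)).contains p.1 = false := by
        rw [Bool.eq_false_iff]
        intro h
        exact hmem ((PySem.Set.mem_ofList _ _).1 (by simpa using h))
      have hset : PySem.Set.ofList ((fs ++ [p]).map Prod.fst)
          = PySem.Set.ofList (fs.map Prod.fst) ++ [p.1] := by
        rw [hmapfst, ofList_append_singleton, PySem.Set.add, if_neg (by rw [hcont]; exact Bool.false_ne_true)]
      have hordeq : ppfOrd (fs ++ [p])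
          = PySem.List.insertBy (fun a b => decide (a < b)) p.1 (ppfOrd fs) := by
        unfold ppfOrd
        rw [hset, PySem.List.sorted_eq_foldl_insertBy, PySem.List.sorted_eq_foldl_insertBy,
            List.foldl_append]
        rfl
      have hpnotin : p.1 ∉ ppfOrd fs := by
        unfold ppfOrd
        rw [PySem.List.mem_sorted, PySem.Set.mem_ofList]
        exact hmem
      have hfilnil : fs.filter (fun q => q.1 == p.1) = [] := by
        rw [List.filter_eq_nil_iff]
        intro q hq
        simp only [beq_iff_eq]
        intro h
        exact hmem (List.mem_map.2 ⟨q, hq, h⟩)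
      rw [hstep, ih]
      unfold ppfGrp
      rw [hordeq, insertBy_flatMap_new _ _ _ hord hg hpnotin]
      refine flatMap_congr_mem _ _ _ (fun k _ => ?_)
      rw [List.filter_append]
      by_cases hk : p.1 = k
      · subst hk
        rw [hfilnil]
        simp [List.filter]
      · have : (p.1 == k) = false := by simp [hk]
        simp [List.filter, this]

-- Set.ofList is a sublist of its argument
theorem ofList_sublist {α : Type} [BEq α] (xs : List α) :
    (PySem.Set.ofList xs).Sublist xs := by
  induction xs using List.reverseRecOn with
  | nil => exact List.Sublist.refl _
  | append_singleton t x ih =>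
    rw [ofList_append_singleton, PySem.Set.add]
    by_cases h : (PySem.Set.ofList t).contains x = true
    · rw [if_pos h]
      exact ih.trans (List.sublist_append_left t [x])
    · rw [if_neg h]
      exact ih.append (List.Sublist.refl [x])

-- THE FLAG: sorted numbers = 1..n  ↔  no duplicates (dict size = n) and distinct keys = 1..n
theorem ppf_flag_iff (fs : List (Int × String)) :
    ((PySem.List.sorted fs (fun p => p.1) false).map (fun p => p.1)
        = PySem.List.pyRange 1 (1 + (((PySem.List.sorted fs (fun p => p.1) false).map (fun p => p.1)).length : Int)) 1)
      ↔ ((PySem.Set.ofList (fs.map Prod.fst)).length = fs.length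
          ∧ ppfOrd fs = PySem.List.pyRange 1 ((fs.length : Int) + 1) 1) := by
  have hperm : (PySem.List.sorted fs (fun p => p.1) false).Perm fs :=
    PySem.List.sorted_perm fs (fun p => p.1) false
  have hpermmap : ((PySem.List.sorted fs (fun p => p.1) false).map (fun p => p.1)).Perm
      (fs.map Prod.fst) := hperm.map _
  have hlen : ((PySem.List.sorted fs (fun p => p.1) false).map (fun p => p.1)).length
      = fs.length := by
    rw [List.length_map, hperm.length_eq]
  have harith : (1 : Int) + (fs.length : Int) = (fs.length : Int) + 1 := by ring
  rw [hlen, harith]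
  set snums := (PySem.List.sorted fs (fun p => p.1) false).map (fun p => p.1) with hsnums
  set R := PySem.List.pyRange 1 ((fs.length : Int) + 1) 1 with hR
  constructor
  · intro h
    have hndR : R.Nodup := PySem.List.nodup_pyRange_one _ _
    have hnds : snums.Nodup := h ▸ hndR
    have hndn : (fs.map Prod.fst).Nodup := (hpermmap.nodup_iff).1 hnds
    have hself : PySem.Set.ofList (fs.map Prod.fst) = fs.map Prod.fst :=
      PySem.Set.ofList_eq_self_of_nodup _ hndn
    constructor
    · rw [hself, List.length_map]
    · unfold ppfOrd
      rw [hself]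
      have hle : List.Pairwise (· ≤ ·) snums :=
        PySem.List.sorted_map_key_pairwise fs (fun p => p.1)
      rw [PySem.List.sorted_id_eq_of_perm_of_pairwise (fs.map Prod.fst) snums hpermmap hle]
      exact h
  · rintro ⟨hlen2, hord⟩
    have hsub : (PySem.Set.ofList (fs.map Prod.fst)).Sublist (fs.map Prod.fst) :=
      ofList_sublist _
    have hself : PySem.Set.ofList (fs.map Prod.fst) = fs.map Prod.fst :=
      hsub.eq_of_length (by rw [hlen2, List.length_map])
    have hndn : (fs.map Prod.fst).Nodup := hself ▸ PySem.Set.nodup_ofList (fs.map Prod.fst)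
    have hgrp : snums = (ppfOrd fs).flatMap
        (fun k => (fs.filter (fun p => p.1 == k)).map (fun p => p.1)) := by
      rw [hsnums, sorted_fst_eq_grp]
      unfold ppfGrp
      rw [List.map_flatMap]
    have hsingle : ∀ k ∈ ppfOrd fs,
        (fs.filter (fun p => p.1 == k)).map (fun p => p.1) = [k] := by
      intro k hk
      have hkmem : k ∈ fs.map Prod.fst := by
        have := hk
        unfold ppfOrd at this
        rw [PySem.List.mem_sorted, PySem.Set.mem_ofList] at this
        exact this
      have hcnt : (fs.map Prod.fst).count k = 1 := List.count_eq_one_of_mem hndn hkmem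
      have hlenf : (fs.filter (fun p => p.1 == k)).length = 1 := by
        rw [← List.countP_eq_length_filter]
        rw [List.count, List.countP_map] at hcnt
        exact hcnt
      have hall : ∀ x ∈ (fs.filter (fun p => p.1 == k)).map (fun p => p.1), x = k := by
        intro x hx
        rcases List.mem_map.1 hx with ⟨q, hq, hxq⟩
        have := (List.mem_filter.1 hq).2
        rw [← hxq]
        simpa using this
      have hlenm : ((fs.filter (fun p => p.1 == k)).map (fun p => p.1)).length = 1 := by
        rw [List.length_map]; exact hlenf
      cases hm : (fs.filter (fun p => p.1 == k)).map (fun p => p.1) with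
      | nil => rw [hm] at hlenm; cases hlenm
      | cons a t =>
        rw [hm] at hlenm
        have ht : t = [] := by
          rw [List.length_cons] at hlenm
          exact List.length_eq_zero_iff.1 (by omega)
        have ha : a = k := hall a (by rw [hm]; simp)
        rw [ht, ha]
    rw [hgrp, flatMap_congr_mem _ _ (fun k => [k]) hsingle, List.flatMap_singleton']
    exact hord

-- B's dict: keys and group contents
theorem ppf_groups_keys (fs : List (Int × String)) :
    (fs.foldl (fun d p => d.modify p.1 [] (fun l => l ++ [p.2]))
      (PySem.Dict.empty (κ := Int) (ν := List String))).keys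
      = PySem.Set.ofList (fs.map Prod.fst) := by
  rw [PySem.Dict.keys_foldl_modify_key fs Prod.fst [] (fun _ p => fun l => l ++ [p.2])]
  rw [PySem.Set.ofList_eq_foldl]
  rfl

-- ===== VERDICT (by name: the statement is the Claim_ definition above) =====
theorem process_page_footnotes_spec : Claim_equal_process_page_footnotes := by
  intro fs _
  unfold Spec_process_page_footnotes
  by_cases hnil : fs = []
  · subst hnil; decide
  · have hkeys := ppf_groups_keys fs
    have hgetD : ∀ k, (fs.foldl (fun d p => d.modify p.1 [] (fun l => l ++ [p.2]))
        (PySem.Dict.empty (κ := Int) (ν := List String))).getD k []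
          = (fs.filter (fun p => p.1 == k)).map (fun p => p.2) := by
      intro k
      rw [PySem.Dict.getD_foldl_modify_append]
      simp [PySem.Dict.getD_empty]
    have h1 : (PySem.List.sorted fs (fun x => x.1) false).foldl (fun acc p => acc ++ [p.2]) []
        = (ppfOrd fs).flatMap (fun k => (fs.foldl (fun d p => d.modify p.1 [] (fun l => l ++ [p.2]))
            (PySem.Dict.empty (κ := Int) (ν := List String))).getD k []) := by
      rw [PySem.List.foldl_append_singleton_eq_map, List.nil_append, sorted_fst_eq_grp]
      unfold ppfGrp
      rw [List.map_flatMap]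
      exact flatMap_congr_mem _ _ _ (fun k _ => (hgetD k).symm)
    have hsize : (fs.foldl (fun d p => d.modify p.1 [] (fun l => l ++ [p.2]))
        (PySem.Dict.empty (κ := Int) (ν := List String))).size
          = (PySem.Set.ofList (fs.map Prod.fst)).length := by
      show List.length _ = _
      rw [← hkeys]
      simp [PySem.Dict.keys]
    have h2 : (if ((PySem.List.sorted fs (fun x => x.1) false).map (fun fn => fn.1)).length
          ≠ (PySem.Set.ofList ((PySem.List.sorted fs (fun x => x.1) false).map (fun fn => fn.1))).length
          then true
          else ppfLoopA ((PySem.List.sorted fs (fun x => x.1) false).map (fun fn => fn.1)) 1)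
        = (decide ((fs.foldl (fun d p => d.modify p.1 [] (fun l => l ++ [p.2]))
            (PySem.Dict.empty (κ := Int) (ν := List String))).size ≠ fs.length)
          || decide (ppfOrd fs ≠ PySem.List.pyRange 1 ((fs.length : Int) + 1) 1)) := by
      rw [hp_eq, hsize]
      have hiff := ppf_flag_iff fs
      by_cases h : (PySem.List.sorted fs (fun p => p.1) false).map (fun p => p.1)
          = PySem.List.pyRange 1 (1 + (((PySem.List.sorted fs (fun p => p.1) false).map (fun p => p.1)).length : Int)) 1
      · rcases hiff.1 h with ⟨hA, hB⟩
        rw [decide_eq_false (not_not_intro h), decide_eq_false (not_not_intro hA),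
            decide_eq_false (not_not_intro hB)]
        rfl
      · rw [decide_eq_true h]
        by_cases hA : (PySem.Set.ofList (fs.map Prod.fst)).length = fs.length
        · have hB : ¬ ppfOrd fs = PySem.List.pyRange 1 ((fs.length : Int) + 1) 1 := by
            intro hB
            exact h (hiff.2 ⟨hA, hB⟩)
          rw [decide_eq_true hB]
          simp
        · rw [decide_eq_true hA]
          rfl
    simp only [process_page_footnotes, process_page_footnotes_alt, if_neg hnil]
    rw [hkeys]
    exact Prod.ext h1 h2
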